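-- pv_equiv track=rewrite | github.com/ZryletTC/CMPTGCS-20 | bookExercises/ch10.py | recNeg
-- ===== SOURCE A (Python) =====
-- def recNeg(lst):
--     if lst[0]<0:
--         return True
--     else:
--         if (len(lst)==1):
--             return False
--         else:
--             return recNeg(lst[1:])
-- ===== SOURCE B (Python) =====
-- def recNeg(lst):
--     if lst[0] < 0:
--         return True
--     for x in lst[1:]:
--         if x < 0:
--             return True
--     return False
-- ===== Notes on version B (the rewrite author's own statement) =====
-- stated objective: simpler
-- what changed: Replaced recursion over repeated list slices with a first-element check followed by one iterative pass over the rest.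
import Mathlib
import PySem

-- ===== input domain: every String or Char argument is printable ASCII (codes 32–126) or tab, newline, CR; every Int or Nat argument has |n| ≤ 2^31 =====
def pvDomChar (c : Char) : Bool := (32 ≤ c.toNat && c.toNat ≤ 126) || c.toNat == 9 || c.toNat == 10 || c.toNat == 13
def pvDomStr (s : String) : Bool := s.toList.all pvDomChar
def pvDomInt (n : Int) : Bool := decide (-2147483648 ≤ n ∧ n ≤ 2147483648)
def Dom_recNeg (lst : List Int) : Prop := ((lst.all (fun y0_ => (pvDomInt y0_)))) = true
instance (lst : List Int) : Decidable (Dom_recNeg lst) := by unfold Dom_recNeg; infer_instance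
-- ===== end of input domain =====

-- B replaces A's slice-recursion by a first-element check plus one iterative pass (simpler: an iterative single pass).
-- ===== PORT A =====
-- Literal port of A: head test, length-1 base case, recursion on the tail slice.
def recNeg : List Int → Bool
  | [] => false   -- unreachable under Pre_recNeg (Python raises IndexError on [])
  | h :: t => if h < 0 then true else if (h :: t).length == 1 then false else recNeg t

-- ===== PORT B =====
-- Port of B: check the first element, then an iterative loop over the tail.
def recNegLoop : List Int → Bool
  | [] => false
  | x :: xs => if x < 0 then true else recNegLoop xs

def recNeg_alt : List Int → Bool
  | [] => false   -- unreachable under Pre_recNeg (Python raises IndexError on [])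
  | h :: t => if h < 0 then true else recNegLoop t

-- ===== PRECONDITION & SPEC =====
-- Pre_ excludes the empty list, on which both A and B raise IndexError at the first-element access.
def Pre_recNeg (lst : List Int) : Prop := lst ≠ []
instance (lst : List Int) : Decidable (Pre_recNeg lst) := by unfold Pre_recNeg; infer_instance
def pvWitness_recNeg : List Int := [1, -2]
def Spec_recNeg (lst : List Int) (out : Bool) : Prop := out = recNeg_alt lst
instance (lst : List Int) (out : Bool) : Decidable (Spec_recNeg lst out) := by unfold Spec_recNeg; infer_instance

-- ===== CLAIM (what is proved, stated in full; the proofs are below) =====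
def Claim_equal_recNeg : Prop := ∀ (lst : List Int), Dom_recNeg lst → Pre_recNeg lst → Spec_recNeg lst (recNeg lst)

-- ===== LEMMAS AND PROOFS =====

-- ===== VERDICT (by name: the statement is the Claim_ definition above) =====
lemma recNeg_eq_cons : ∀ (h : Int) (t : List Int), recNeg (h :: t) = recNegLoop (h :: t) := by
  intro h t
  induction t generalizing h with
  | nil => simp [recNeg, recNegLoop]
  | cons a b ih =>
    rw [recNeg.eq_2, ih a]
    by_cases hh : h < 0 <;> simp [recNegLoop, hh]

theorem recNeg_spec : Claim_equal_recNeg := by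
  intro lst _ hpre
  unfold Spec_recNeg
  cases lst with
  | nil => exact absurd rfl hpre
  | cons h t => rw [recNeg_eq_cons h t]; simp [recNeg_alt, recNegLoop]
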